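-- pv_equiv track=rewrite | github.com/yllausac/programmers | [2020 KAKAO BLIND RECRUITMENT] 블록 이동하기.py | solution
-- ===== SOURCE A (Python) =====
-- from collections import deque
--
-- def getNewPos(pos, board):
--     dir = [[0, 1], [1, 0], [0, -1], [-1, 0]]
--     newPos = []
--     y1, x1 = pos[0]
--     y2, x2 = pos[1]
--
--     for dy, dx in dir:
--         if board[y1 + dy][x1 + dx] == 0 and board[y2 + dy][x2 + dx] == 0:
--             newPos.append({(y1 + dy, x1 + dx), (y2 + dy, x2 + dx)})
--     # 가로 -> 세로
--     if y1 == y2: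
--         for dy, dx in dir[1::2]:
--             if board[y1 + dy][x1 + dx] == 0 and board[y2 + dy][x2 + dx] == 0:
--                 newPos.append({(y1, x1), (y1+dy, x1)})
--                 newPos.append({(y2, x2), (y2+dy, x2)})
--     # 세로 -> 가로
--     else:
--         for dy, dx in dir[::2]:
--             if board[y1+dy][x1+dx] == 0 and board[y2+dy][x2+dx] == 0:
--                 newPos.append({(y1, x1), (y1, x1+dx)})
--                 newPos.append({(y2, x2), (y2, x2+dx)})
--     return newPos
--
-- def solution(board):
--     n = len(board)
--     board = [[1] + b + [1] for b in board]
--     board = [[1] * (n+2)] + board + [[1] * (n+2)]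
--     pos = {(1, 1), (1, 2)}
--     queue = deque()
--     visited = []
--     queue.append([pos, 0])
--     visited.append(pos)
--     while queue:
--         pos, distance = queue.popleft()
--         distance += 1
--         for newPos in getNewPos(list(pos), board):
--             if (n, n) in newPos:
--                 return distance
--             if newPos not in visited:
--                 queue.append([newPos, distance])
--                 visited.append(newPos)
--     return -1
-- ===== SOURCE B (Python) =====
-- def getNewPos(pos, board):
--     dir = [[0, 1], [1, 0], [0, -1], [-1, 0]]
--     newPos = []
--     y1, x1 = pos[0]
--     y2, x2 = pos[1]
--
--     for dy, dx in dir: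
--         if board[y1 + dy][x1 + dx] == 0 and board[y2 + dy][x2 + dx] == 0:
--             newPos.append({(y1 + dy, x1 + dx), (y2 + dy, x2 + dx)})
--     if y1 == y2:
--         for dy, dx in dir[1::2]:
--             if board[y1 + dy][x1 + dx] == 0 and board[y2 + dy][x2 + dx] == 0:
--                 newPos.append({(y1, x1), (y1+dy, x1)})
--                 newPos.append({(y2, x2), (y2+dy, x2)})
--     else:
--         for dy, dx in dir[::2]:
--             if board[y1+dy][x1+dx] == 0 and board[y2+dy][x2+dx] == 0:
--                 newPos.append({(y1, x1), (y1, x1+dx)})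
--                 newPos.append({(y2, x2), (y2, x2+dx)})
--     return newPos
--
--
-- def solution(board):
--     # Dijkstra on the block states: a priority queue (list + linear extract-min)
--     # of (distance, state) and a dict mapping each state's canonical key to its
--     # best known distance; the goal is tested when a state is popped.
--     n = len(board)
--     g = [[1] * (n + 2)] + [[1] + row + [1] for row in board] + [[1] * (n + 2)]
--     start = ((1, 1), (1, 2))
--     dist = {start: 0}
--     pq = [(0, start)]
--     while pq:
--         best = 0
--         for i in range(1, len(pq)):
--             if pq[i][0] < pq[best][0]:
--                 best = i
--         d, state = pq.pop(best)
--         if (n, n) in state: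
--             return d
--         for nb in getNewPos(list(state), g):
--             s = tuple(nb)
--             key = s if s[0] <= s[1] else (s[1], s[0])
--             nd = d + 1
--             if key not in dist or nd < dist[key]:
--                 dist[key] = nd
--                 pq.append((nd, s))
--     return -1
-- ===== Notes on version B (the rewrite author's own statement) =====
-- stated objective: alternative
-- what changed: A's FIFO-queue breadth-first search (return at neighbour generation, visited kept as a list scanned with set equality) is replaced by Dijkstra's algorithm: a priority queue of (distance, state) with linear extract-min, a dict mapping each state's canonical (sorted-pair) key to its best known distance with a relaxation test, and the goal tested when a state is popped.
-- outside the precondition, e.g. on solution([[0]]): A returns -1, B returns 0; on solution([[0, 0, 0]]): A returns 2, B returns 0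
import Mathlib
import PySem

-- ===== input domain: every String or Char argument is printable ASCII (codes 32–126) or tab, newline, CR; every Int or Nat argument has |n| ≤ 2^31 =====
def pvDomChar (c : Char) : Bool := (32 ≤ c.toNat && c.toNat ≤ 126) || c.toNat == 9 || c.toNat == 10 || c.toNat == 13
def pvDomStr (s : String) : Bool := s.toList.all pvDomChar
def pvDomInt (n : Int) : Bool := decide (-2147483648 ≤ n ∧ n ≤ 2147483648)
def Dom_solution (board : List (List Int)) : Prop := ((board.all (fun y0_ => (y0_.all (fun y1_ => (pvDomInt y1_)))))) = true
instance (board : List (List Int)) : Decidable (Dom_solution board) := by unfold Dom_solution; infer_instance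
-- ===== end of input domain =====

-- B replaces A's FIFO breadth-first search (return at neighbour generation, visited list scanned
-- with set equality) by Dijkstra's algorithm: a priority queue of (distance, state) with linear
-- extract-min, a dict of best distances keyed by the canonical (sorted) cell pair, relaxation at
-- the neighbours, and the goal tested when a state is popped; same return value.

-- ===== PORT A =====
-- helpers shared by the two ports (identical lines in Source A and Source B): directions, padded board,
-- board[y][x], and getNewPos.
def pvDirs : List (Int × Int) := [(0, 1), (1, 0), (0, -1), (-1, 0)]

-- board[y][x]; out of range gives 1 (a wall): unreachable under Pre_solution (Python raises IndexError there)
def pvCell (board : List (List Int)) (y x : Int) : Int :=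
  (PySem.List.pyGet? ((PySem.List.pyGet? board y).getD []) x).getD 1

def pvPad (board : List (List Int)) : List (List Int) :=
  [List.replicate (board.length + 2) 1]
    ++ board.map (fun r => [1] ++ r ++ [1])
    ++ [List.replicate (board.length + 2) 1]

-- getNewPos(pos, board): a state is a Python set of two cells, kept as a 2-element list;
-- the produced Int result of either search never depends on the iteration order of these sets.
def getNewPos (pos : List (Int × Int)) (board : List (List Int)) : List (List (Int × Int)) :=
  match pos with
  | [(y1, x1), (y2, x2)] =>
    let straight := pvDirs.foldl (fun acc d =>
      if pvCell board (y1 + d.1) (x1 + d.2) == 0 && pvCell board (y2 + d.1) (x2 + d.2) == 0 then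
        acc ++ [PySem.Set.ofList [(y1 + d.1, x1 + d.2), (y2 + d.1, x2 + d.2)]]
      else acc) []
    if y1 == y2 then
      -- dir[1::2] = [(1,0),(-1,0)] : horizontal → vertical
      [((1 : Int), (0 : Int)), (-1, 0)].foldl (fun acc d =>
        if pvCell board (y1 + d.1) (x1 + d.2) == 0 && pvCell board (y2 + d.1) (x2 + d.2) == 0 then
          acc ++ [PySem.Set.ofList [(y1, x1), (y1 + d.1, x1)],
                  PySem.Set.ofList [(y2, x2), (y2 + d.1, x2)]]
        else acc) straight
    else
      -- dir[::2] = [(0,1),(0,-1)] : vertical → horizontal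
      [((0 : Int), (1 : Int)), (0, -1)].foldl (fun acc d =>
        if pvCell board (y1 + d.1) (x1 + d.2) == 0 && pvCell board (y2 + d.1) (x2 + d.2) == 0 then
          acc ++ [PySem.Set.ofList [(y1, x1), (y1, x1 + d.2)],
                  PySem.Set.ofList [(y2, x2), (y2, x2 + d.2)]]
        else acc) straight
  | _ => []  -- unreachable: every state has exactly two cells (Python would raise on unpacking)

def pvStart : List (Int × Int) := PySem.Set.ofList [(1, 1), (1, 2)]

-- A only: membership of a two-cell state in the visited list (Python compares sets with ==)
def pvMemState (visited : List (List (Int × Int))) (s : List (Int × Int)) : Bool :=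
  visited.any (fun t => PySem.Set.equal t s)

-- A's inner for-loop over getNewPos: return the distance (error) or the updated queue and visited
def pvScanA (n d : Int) (nps : List (List (Int × Int)))
    (queue : List (List (Int × Int) × Int)) (visited : List (List (Int × Int))) :
    Except Int (List (List (Int × Int) × Int) × List (List (Int × Int))) :=
  match nps with
  | [] => .ok (queue, visited)
  | np :: rest =>
    if np.contains (n, n) then .error d
    else if pvMemState visited np then pvScanA n d rest queue visited
    else pvScanA n d rest (queue ++ [(np, d)]) (visited ++ [np])

-- A's while-loop over the FIFO queue; the fuel only makes it total and is proved unreachable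
def pvLoopA (board : List (List Int)) (n : Int) :
    Nat → List (List (Int × Int) × Int) → List (List (Int × Int)) → Int
  | _, [], _ => -1
  | 0, _ :: _, _ => -1
  | fuel + 1, (pos, dist) :: queue, visited =>
    match pvScanA n (dist + 1) (getNewPos pos board) queue visited with
    | .error ans => ans
    | .ok (queue', visited') => pvLoopA board n fuel queue' visited'

def solution (board : List (List Int)) : Int :=
  pvLoopA (pvPad board) board.length ((board.length + 2) ^ 4 + 1) [(pvStart, 0)] [pvStart]

-- ===== PORT B =====
-- B keeps a state as the pair of its two cells, in the order the set iteration yields them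
abbrev pvSt := (Int × Int) × (Int × Int)

def pvToPair (s : List (Int × Int)) : pvSt :=
  match s with
  | [a, b] => (a, b)
  | _ => ((0, 0), (0, 0))  -- unreachable: every state has two cells (Python would raise at s[1])

-- Python tuple comparison s[0] <= s[1] on int pairs (lexicographic)
def pvLeLex (p q : Int × Int) : Bool := p.1 < q.1 || (p.1 == q.1 && p.2 ≤ q.2)

-- the canonical dict key of a state: its two cells in sorted order
def pvKey (s : pvSt) : pvSt := if pvLeLex s.1 s.2 then s else (s.2, s.1)

-- B's for-loop over getNewPos: Dijkstra relaxation, pushing improved states on the queue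
def pvRelax (d : Int) (nps : List (List (Int × Int)))
    (dist : PySem.Dict pvSt Int) (pq : List (Int × pvSt)) :
    PySem.Dict pvSt Int × List (Int × pvSt) :=
  match nps with
  | [] => (dist, pq)
  | nb :: rest =>
    let s := pvToPair nb
    let key := pvKey s
    if !dist.contains key || d + 1 < dist.getD key 0 then
      pvRelax d rest (dist.insert key (d + 1)) (pq ++ [(d + 1, s)])
    else pvRelax d rest dist pq

-- Source B's linear extract-min scan: the index of the first queue entry with minimal distance
def pvArgmin (pq : List (Int × pvSt)) : Int :=
  (PySem.List.pyRange 1 pq.length 1).foldl (fun best i =>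
    if ((PySem.List.pyGet? pq i).map Prod.fst).getD 0
        < ((PySem.List.pyGet? pq best).map Prod.fst).getD 0 then i else best) 0

-- B's while-loop; the fuel only makes it total and is proved unreachable
def pvLoopB (board : List (List Int)) (n : Int) :
    Nat → PySem.Dict pvSt Int → List (Int × pvSt) → Int
  | _, _, [] => -1
  | 0, _, _ :: _ => -1
  | fuel + 1, dist, e :: rest =>
    match PySem.List.pop? (e :: rest) (pvArgmin (e :: rest)) with
    | none => -1  -- unreachable: the argmin is a valid index
    | some ((d, s), pq') =>
      if s.1 == (n, n) || s.2 == (n, n) then d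
      else
        let r := pvRelax d (getNewPos [s.1, s.2] board) dist pq'
        pvLoopB board n fuel r.1 r.2

def solution_alt (board : List (List Int)) : Int :=
  pvLoopB (pvPad board) board.length (2 * (board.length + 2) ^ 4 + 2)
    (PySem.Dict.ofList [((((1 : Int), (1 : Int)), ((1 : Int), (2 : Int))), (0 : Int))])
    [((0 : Int), (((1 : Int), (1 : Int)), ((1 : Int), (2 : Int))))]

-- ===== PRECONDITION & SPEC =====
-- Pre_ admits (a) the problem's natural domain, square boards with n ≥ 2, and (b) boards with at
-- least two rows whose block cannot make a single move (every first step is safely blocked),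
-- where A returns -1 at once.  Excluded because A RAISES (IndexError in the padded indexing) or
-- the Python set iteration order could matter: empty, ragged and too-narrow boards outside (a)/(b).
-- Excluded although A returns: boards with exactly one row — there the goal cell (n,n) = (1,1) is
-- already covered by the start block, a degenerate corner A never tests (it only tests generated
-- neighbours, returning a move count or -1) while B's pop-time goal test returns 0; neither
-- behaviour is specified for a board the 1x2 block does not even fit.
def pvSquare (board : List (List Int)) : Prop :=
  2 ≤ board.length ∧ ∀ r ∈ board, r.length = board.length
def pvBlocked (board : List (List Int)) : Prop :=
  2 ≤ board.length
  ∧ 1 ≤ (board.getD 0 []).length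
  ∧ ¬((board.getD 0 [])[1]? = some 0 ∧ (board.getD 0 [])[2]? = some 0)
  ∧ ¬((board.getD 1 [])[0]? = some 0 ∧ (board.getD 1 [])[1]? = some 0)
def Pre_solution (board : List (List Int)) : Prop := pvSquare board ∨ pvBlocked board
instance (board : List (List Int)) : Decidable (Pre_solution board) := by
  unfold Pre_solution pvSquare pvBlocked; infer_instance

def pvWitness_solution : List (List Int) := [[0, 0], [0, 0]]

def Spec_solution (board : List (List Int)) (out : Int) : Prop := out = solution_alt board
instance (board : List (List Int)) (out : Int) : Decidable (Spec_solution board out) := by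
  unfold Spec_solution; infer_instance

-- ===== CLAIM (what is proved, stated in full; the proofs are below) =====
def Claim_equal_solution : Prop :=
  ∀ (board : List (List Int)), Dom_solution board → Pre_solution board →
    Spec_solution board (solution board)

-- ===== LEMMAS AND PROOFS =====

-- a cell of the arena, a legal two-cell state, a legal state pair
def pvInC (n : Nat) (c : Int × Int) : Prop := 1 ≤ c.1 ∧ c.1 ≤ n ∧ 1 ≤ c.2 ∧ c.2 ≤ n
def pvGood (n : Nat) (s : List (Int × Int)) : Prop :=
  ∃ a b, s = [a, b] ∧ a ≠ b ∧ pvInC n a ∧ pvInC n b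
def pvGoodP (n : Nat) (p : pvSt) : Prop := p.1 ≠ p.2 ∧ pvInC n p.1 ∧ pvInC n p.2


-- PySem.Set.equal on two-cell states
theorem pv_ofList_pair (a b : Int × Int) (h : a ≠ b) :
    PySem.Set.ofList [a, b] = [a, b] := by
  simp [PySem.Set.ofList, PySem.Set.add, PySem.Set.empty, PySem.Set.contains, Ne.symm h]

theorem pv_equal_iff (a b c d : Int × Int) (hab : a ≠ b) (hcd : c ≠ d) :
    PySem.Set.equal [a, b] [c, d] = true ↔ (a = c ∧ b = d) ∨ (a = d ∧ b = c) := by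
  simp only [PySem.Set.equal, PySem.Set.issubset, PySem.Set.contains, Bool.and_eq_true,
    List.all_cons, List.all_nil, Bool.and_true, List.contains_eq_mem, decide_eq_true_eq,
    List.mem_cons, List.not_mem_nil, or_false]
  constructor
  · rintro ⟨⟨h1 | h1, h2 | h2⟩, h3 | h3, h4 | h4⟩ <;> subst_vars <;> tauto
  · rintro (⟨rfl, rfl⟩ | ⟨rfl, rfl⟩) <;> tauto

-- membership in the append-if folds of getNewPos
theorem pv_mem_foldl (c : Int × Int → Bool) (g : Int × Int → List (List (Int × Int))) :
    ∀ (l : List (Int × Int)) (acc : List (List (Int × Int))) (x : List (Int × Int)),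
      x ∈ l.foldl (fun a d => if c d then a ++ g d else a) acc →
      x ∈ acc ∨ ∃ d ∈ l, c d = true ∧ x ∈ g d := by
  intro l
  induction l with
  | nil => intro acc x h; exact Or.inl h
  | cons d t ih =>
    intro acc x h
    simp only [List.foldl_cons] at h
    rcases ih _ x h with hx | ⟨d', hd', hc, hg⟩
    · by_cases hc : c d
      · simp [hc] at hx
        rcases hx with hx | hx
        · exact Or.inl hx
        · exact Or.inr ⟨d, by simp, hc, hx⟩
      · simp [hc] at hx; exact Or.inl hx
    · exact Or.inr ⟨d', by simp [hd'], hc, hg⟩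

-- a 0-cell of the padded board lies in the arena
theorem pv_cell_zero (board : List (List Int)) (hpre : pvSquare board) (y x : Int)
    (hy0 : 0 ≤ y) (hy1 : y ≤ board.length + 1) (hx0 : 0 ≤ x) (hx1 : x ≤ board.length + 1)
    (h0 : pvCell (pvPad board) y x = 0) :
    1 ≤ y ∧ y ≤ board.length ∧ 1 ≤ x ∧ x ≤ board.length := by
  obtain ⟨hn, hsq⟩ := hpre
  obtain ⟨k, rfl⟩ : ∃ k : Nat, y = (k : Int) := ⟨y.toNat, (Int.toNat_of_nonneg hy0).symm⟩
  obtain ⟨j, rfl⟩ : ∃ j : Nat, x = (j : Int) := ⟨x.toNat, (Int.toNat_of_nonneg hx0).symm⟩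
  have hk : k ≤ board.length + 1 := by exact_mod_cast hy1
  have hj : j ≤ board.length + 1 := by exact_mod_cast hx1
  unfold pvCell at h0
  simp only [PySem.List.pyGet?_natCast] at h0
  rcases Nat.eq_zero_or_pos k with rfl | hk1
  · have hr : (pvPad board)[0]? = some (List.replicate (board.length + 2) 1) := by
      simp [pvPad]
    rw [hr] at h0
    simp only [Option.getD_some] at h0
    rw [List.getElem?_replicate] at h0
    simp only [show j < board.length + 2 from by omega, if_pos] at h0
    simp at h0
  · rcases Nat.lt_or_ge (k - 1) board.length with hmid | hend
    · obtain ⟨r, hr, hrm⟩ : ∃ r, board[k-1]? = some r ∧ r ∈ board := by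
        rcases List.getElem?_eq_some_iff.2 ⟨hmid, rfl⟩ with h
        exact ⟨_, h, List.getElem_mem _⟩
      have hrl : r.length = board.length := hsq r hrm
      have hrow : (pvPad board)[k]? = some ([1] ++ r ++ [1]) := by
        have hps : pvPad board = (List.replicate (board.length+2) 1 :: board.map (fun r => [1] ++ r ++ [1])) ++ [List.replicate (board.length+2) 1] := by
          simp [pvPad]
        rw [hps, List.getElem?_append_left (by simp; omega),
          show k = (k-1) + 1 from by omega, List.getElem?_cons_succ,
          List.getElem?_map, hr]
        rfl
      rw [hrow] at h0
      simp only [Option.getD_some] at h0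
      rcases Nat.eq_zero_or_pos j with rfl | hj1
      · simp at h0
      · rcases Nat.lt_or_ge (j - 1) board.length with hjm | hje
        · refine ⟨by omega, by omega, by omega, by omega⟩
        · have hj2 : j = board.length + 1 := by omega
          subst hj2
          rw [show ([(1:Int)] ++ r ++ [1]) = ([(1:Int)] ++ r) ++ [1] from by simp,
            List.getElem?_append_right (by simp [hrl])] at h0
          simp [hrl] at h0
    · have hk2 : k = board.length + 1 := by omega
      subst hk2
      have hr : (pvPad board)[board.length+1]? = some (List.replicate (board.length + 2) 1) := by
        have hps : pvPad board = (List.replicate (board.length+2) 1 :: board.map (fun r => [1] ++ r ++ [1])) ++ [List.replicate (board.length+2) 1] := by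
          simp [pvPad]
        rw [hps, List.getElem?_append_right (by simp)]
        simp
      rw [hr] at h0
      simp only [Option.getD_some] at h0
      rw [List.getElem?_replicate] at h0
      simp only [show j < board.length + 2 from by omega, if_pos] at h0
      simp at h0

-- every state getNewPos produces from a legal state is legal
theorem pv_getNewPos_good (board : List (List Int)) (hpre : pvSquare board)
    (pos : List (Int × Int)) (hp : pvGood board.length pos) :
    ∀ np ∈ getNewPos pos (pvPad board), pvGood board.length np := by
  obtain ⟨⟨y1, x1⟩, ⟨y2, x2⟩, rfl, hab, ⟨ha1, ha2, ha3, ha4⟩, ⟨hb1, hb2, hb3, hb4⟩⟩ := hp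
  intro np hnp
  simp only [getNewPos] at hnp
  have hstraight : ∀ m ∈ ((pvDirs.foldl (fun acc d =>
      if pvCell (pvPad board) (y1 + d.1) (x1 + d.2) == 0 && pvCell (pvPad board) (y2 + d.1) (x2 + d.2) == 0 then
        acc ++ [PySem.Set.ofList [(y1 + d.1, x1 + d.2), (y2 + d.1, x2 + d.2)]]
      else acc) []) : List (List (Int × Int))), pvGood board.length m := by
    intro m hm
    rcases pv_mem_foldl _ _ _ _ _ hm with h | ⟨d, hd, hc, hg⟩
    · simp at h
    · simp only [Bool.and_eq_true, beq_iff_eq] at hc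
      obtain ⟨hc1, hc2⟩ := hc
      simp only [List.mem_singleton] at hg
      subst hg
      simp only [pvDirs, List.mem_cons, List.not_mem_nil, or_false] at hd
      have hdd : (d.1 = 0 ∧ d.2 = 1) ∨ (d.1 = 1 ∧ d.2 = 0) ∨ (d.1 = 0 ∧ d.2 = -1) ∨ (d.1 = -1 ∧ d.2 = 0) := by
        rcases hd with rfl | rfl | rfl | rfl <;> simp
      obtain ⟨hz1, hz2, hz3, hz4⟩ := pv_cell_zero board hpre _ _ (by omega) (by omega) (by omega) (by omega) hc1
      obtain ⟨hw1, hw2, hw3, hw4⟩ := pv_cell_zero board hpre _ _ (by omega) (by omega) (by omega) (by omega) hc2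
      have hne : (y1 + d.1, x1 + d.2) ≠ (y2 + d.1, x2 + d.2) := by
        intro h
        apply hab
        rw [Prod.mk.injEq] at h ⊢
        omega
      rw [pv_ofList_pair _ _ hne]
      exact ⟨_, _, rfl, hne, ⟨hz1, hz2, hz3, hz4⟩, ⟨hw1, hw2, hw3, hw4⟩⟩
  by_cases hy : y1 = y2
  · simp only [show (y1 == y2) = true from by simp [hy], if_pos] at hnp
    rcases pv_mem_foldl _ _ _ _ _ hnp with h | ⟨d, hd, hc, hg⟩
    · exact hstraight _ h
    · simp only [Bool.and_eq_true, beq_iff_eq] at hc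
      obtain ⟨hc1, hc2⟩ := hc
      simp only [List.mem_cons, List.not_mem_nil, or_false] at hd hg
      have hdd : (d.1 = 1 ∧ d.2 = 0) ∨ (d.1 = -1 ∧ d.2 = 0) := by
        rcases hd with rfl | rfl <;> simp
      have hd2 : d.2 = 0 := by rcases hdd with ⟨_, h⟩ | ⟨_, h⟩ <;> exact h
      rw [hd2, add_zero] at hc1 hc2
      obtain ⟨hz1, hz2, hz3, hz4⟩ := pv_cell_zero board hpre _ _ (by omega) (by omega) (by omega) (by omega) hc1
      obtain ⟨hw1, hw2, hw3, hw4⟩ := pv_cell_zero board hpre _ _ (by omega) (by omega) (by omega) (by omega) hc2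
      rcases hg with rfl | rfl
      · have hne : ((y1 : Int), x1) ≠ (y1 + d.1, x1) := by
          intro h; rw [Prod.mk.injEq] at h; omega
        rw [pv_ofList_pair _ _ hne]
        exact ⟨_, _, rfl, hne, ⟨ha1, ha2, ha3, ha4⟩, ⟨hz1, hz2, hz3, hz4⟩⟩
      · have hne : ((y2 : Int), x2) ≠ (y2 + d.1, x2) := by
          intro h; rw [Prod.mk.injEq] at h; omega
        rw [pv_ofList_pair _ _ hne]
        exact ⟨_, _, rfl, hne, ⟨hb1, hb2, hb3, hb4⟩, ⟨hw1, hw2, hw3, hw4⟩⟩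
  · simp only [show (y1 == y2) = false from by simp [hy], Bool.false_eq_true, if_false] at hnp
    rcases pv_mem_foldl _ _ _ _ _ hnp with h | ⟨d, hd, hc, hg⟩
    · exact hstraight _ h
    · simp only [Bool.and_eq_true, beq_iff_eq] at hc
      obtain ⟨hc1, hc2⟩ := hc
      simp only [List.mem_cons, List.not_mem_nil, or_false] at hd hg
      have hdd : (d.1 = 0 ∧ d.2 = 1) ∨ (d.1 = 0 ∧ d.2 = -1) := by
        rcases hd with rfl | rfl <;> simp
      have hd1 : d.1 = 0 := by rcases hdd with ⟨h, _⟩ | ⟨h, _⟩ <;> exact h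
      rw [hd1, add_zero] at hc1 hc2
      obtain ⟨hz1, hz2, hz3, hz4⟩ := pv_cell_zero board hpre _ _ (by omega) (by omega) (by omega) (by omega) hc1
      obtain ⟨hw1, hw2, hw3, hw4⟩ := pv_cell_zero board hpre _ _ (by omega) (by omega) (by omega) (by omega) hc2
      rcases hg with rfl | rfl
      · have hne : ((y1 : Int), x1) ≠ (y1, x1 + d.2) := by
          intro h; rw [Prod.mk.injEq] at h; omega
        rw [pv_ofList_pair _ _ hne]
        exact ⟨_, _, rfl, hne, ⟨ha1, ha2, ha3, ha4⟩, ⟨hz1, hz2, hz3, hz4⟩⟩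
      · have hne : ((y2 : Int), x2) ≠ (y2, x2 + d.2) := by
          intro h; rw [Prod.mk.injEq] at h; omega
        rw [pv_ofList_pair _ _ hne]
        exact ⟨_, _, rfl, hne, ⟨hb1, hb2, hb3, hb4⟩, ⟨hw1, hw2, hw3, hw4⟩⟩


-- the blocked-start branch: whenever pvBlocked holds, the very first neighbour scan is empty
theorem pv_pad_decomp (board : List (List Int)) :
    pvPad board = (List.replicate (board.length + 2) 1
      :: board.map (fun r => [1] ++ r ++ [1])) ++ [List.replicate (board.length + 2) 1] := by
  simp [pvPad]

theorem pv_cell_r0 (board : List (List Int)) (j : Nat) (hj : j < board.length + 2) :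
    pvCell (pvPad board) 0 (j : Int) = 1 := by
  unfold pvCell
  rw [show (0 : Int) = ((0 : Nat) : Int) from rfl]
  simp only [PySem.List.pyGet?_natCast]
  rw [pv_pad_decomp]
  simp [hj]

theorem pv_cell_row (board : List (List Int)) (k : Nat) (r : List Int)
    (hk : board[k]? = some r) (j : Nat) :
    pvCell (pvPad board) ((k : Int) + 1) (j : Int) = (1 :: (r ++ [1]))[j]?.getD 1 := by
  unfold pvCell
  rw [show ((k : Int) + 1) = (((k + 1 : Nat)) : Int) from by push_cast; ring]
  simp only [PySem.List.pyGet?_natCast]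
  rw [pv_pad_decomp]
  have hkl : k < board.length := (List.getElem?_eq_some_iff.1 hk).1
  rw [List.getElem?_append_left (by simp; omega), List.getElem?_cons_succ,
    List.getElem?_map, hk]
  simp

theorem pv_blocked_empty (board : List (List Int)) (hbl : pvBlocked board) :
    getNewPos pvStart (pvPad board) = [] := by
  obtain ⟨hL, hL0, hC1, hC2⟩ := hbl
  have h0 : board[0]? = some (board.getD 0 []) := by
    rw [List.getElem?_eq_getElem (by omega), List.getD_eq_getElem board [] (by omega)]
  have e10 : pvCell (pvPad board) 1 0 = 1 := by
    have := pv_cell_row board 0 _ h0 0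
    simpa using this
  have e12 : pvCell (pvPad board) 1 2 = ((board.getD 0 []) ++ [1])[1]?.getD 1 := by
    have := pv_cell_row board 0 _ h0 2
    simpa using this
  have e13 : pvCell (pvPad board) 1 3 = ((board.getD 0 []) ++ [1])[2]?.getD 1 := by
    have := pv_cell_row board 0 _ h0 3
    simpa using this
  have e01 : pvCell (pvPad board) 0 1 = 1 := by
    have := pv_cell_r0 board 1 (by omega); simpa using this
  have e02 : pvCell (pvPad board) 0 2 = 1 := by
    have := pv_cell_r0 board 2 (by omega); simpa using this
  have hA1 : ¬(pvCell (pvPad board) 1 2 = 0 ∧ pvCell (pvPad board) 1 3 = 0) := by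
    rintro ⟨hz2, hz3⟩
    rcases h1 : (board.getD 0 [])[1]? with _ | v
    · have hlen1 : (board.getD 0 []).length = 1 := by
        have := List.getElem?_eq_none_iff.1 h1; omega
      rw [e12, List.getElem?_append_right (by omega),
        show 1 - (board.getD 0 []).length = 0 from by omega] at hz2
      simp at hz2
    · have hlen2 : 1 < (board.getD 0 []).length := (List.getElem?_eq_some_iff.1 h1).1
      rw [e12, List.getElem?_append_left hlen2, h1, Option.getD_some] at hz2
      subst hz2
      rcases h2' : (board.getD 0 [])[2]? with _ | w
      · have hlen : (board.getD 0 []).length ≤ 2 := by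
          have := List.getElem?_eq_none_iff.1 h2'; omega
        rw [e13, List.getElem?_append_right (by omega)] at hz3
        rw [show 2 - (board.getD 0 []).length = 0 from by omega] at hz3
        simp at hz3
      · have hlen : 2 < (board.getD 0 []).length := (List.getElem?_eq_some_iff.1 h2').1
        rw [e13, List.getElem?_append_left (by omega), h2', Option.getD_some] at hz3
        exact hC1 ⟨h1, by rw [h2', hz3]⟩
  have hA2 : ¬(pvCell (pvPad board) 2 1 = 0 ∧ pvCell (pvPad board) 2 2 = 0) := by
    rintro ⟨hz1, hz2⟩
    have h1 : board[1]? = some (board.getD 1 []) := by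
      rw [List.getElem?_eq_getElem (by omega), List.getD_eq_getElem board [] (by omega)]
    have e21 : pvCell (pvPad board) 2 1 = ((board.getD 1 []) ++ [1])[0]?.getD 1 := by
      have := pv_cell_row board 1 _ h1 1
      simpa using this
    have e22 : pvCell (pvPad board) 2 2 = ((board.getD 1 []) ++ [1])[1]?.getD 1 := by
      have := pv_cell_row board 1 _ h1 2
      simpa using this
    rcases h10 : (board.getD 1 [])[0]? with _ | v
    · have hlen0 : (board.getD 1 []).length = 0 := by
        have := List.getElem?_eq_none_iff.1 h10; omega
      rw [e21, List.getElem?_append_right (by omega),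
        show 0 - (board.getD 1 []).length = 0 from by omega] at hz1
      simp at hz1
    · have hlen0' : 0 < (board.getD 1 []).length := (List.getElem?_eq_some_iff.1 h10).1
      rw [e21, List.getElem?_append_left hlen0', h10, Option.getD_some] at hz1
      subst hz1
      rcases h2' : (board.getD 1 [])[1]? with _ | w
      · have hlen : (board.getD 1 []).length ≤ 1 := by
          have := List.getElem?_eq_none_iff.1 h2'; omega
        rw [e22, List.getElem?_append_right (by omega)] at hz2
        rw [show 1 - (board.getD 1 []).length = 0 from by omega] at hz2
        simp at hz2
      · have hlen : 1 < (board.getD 1 []).length := (List.getElem?_eq_some_iff.1 h2').1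
        rw [e22, List.getElem?_append_left (by omega), h2', Option.getD_some] at hz2
        exact hC2 ⟨h10, by rw [h2', hz2]⟩
  have hA3 : ¬(pvCell (pvPad board) 1 0 = 0 ∧ pvCell (pvPad board) 1 1 = 0) := by
    rintro ⟨h, -⟩; rw [e10] at h; norm_num at h
  have hA4 : ¬(pvCell (pvPad board) 0 1 = 0 ∧ pvCell (pvPad board) 0 2 = 0) := by
    rintro ⟨h, -⟩; rw [e01] at h; norm_num at h
  have hstart_eq : pvStart = [((1 : Int), (1 : Int)), (1, 2)] := by decide
  rw [hstart_eq]
  simp only [getNewPos, pvDirs, List.foldl_cons, List.foldl_nil]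
  norm_num
  simp only [if_neg hA1, if_neg hA2, if_neg hA3, if_neg hA4]

-- encoding a legal cell, and the size bound on the dict of states
def pvEncC (n : Nat) (c : Int × Int) : Nat := c.1.toNat * (n + 2) + c.2.toNat

theorem pv_encC_lt (n : Nat) (c : Int × Int) (h : pvInC n c) : pvEncC n c < (n + 2) ^ 2 := by
  obtain ⟨h1, h2, h3, h4⟩ := h
  have e1 : c.1.toNat ≤ n := by omega
  have e2 : c.2.toNat ≤ n := by omega
  have hsq : (n + 2) ^ 2 = n * (n + 2) + 2 * n + 4 := by ring
  have hmul : c.1.toNat * (n + 2) ≤ n * (n + 2) := Nat.mul_le_mul_right _ e1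
  unfold pvEncC
  omega

theorem pv_encC_inj (n : Nat) (c c' : Int × Int) (h : pvInC n c) (h' : pvInC n c')
    (he : pvEncC n c = pvEncC n c') : c = c' := by
  obtain ⟨h1, h2, h3, h4⟩ := h
  obtain ⟨h1', h2', h3', h4'⟩ := h'
  unfold pvEncC at he
  have m1 : c.2.toNat < n + 2 := by omega
  have m2 : c'.2.toNat < n + 2 := by omega
  have e2 : c.2.toNat = c'.2.toNat := by
    have := congrArg (· % (n + 2)) he
    simpa [Nat.mul_add_mod, Nat.mod_eq_of_lt m1, Nat.mod_eq_of_lt m2] using this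
  have e1 : c.1.toNat = c'.1.toNat := by
    have hm : c.1.toNat * (n + 2) = c'.1.toNat * (n + 2) := by omega
    exact Nat.eq_of_mul_eq_mul_right (by omega) hm
  exact Prod.ext (by omega) (by omega)

def pvEncP (n : Nat) (k : pvSt) : Nat := pvEncC n k.1 * (n + 2) ^ 2 + pvEncC n k.2

theorem pv_encP_lt (n : Nat) (k : pvSt) (h : pvInC n k.1 ∧ pvInC n k.2) :
    pvEncP n k < (n + 2) ^ 4 := by
  have l1 := pv_encC_lt n k.1 h.1
  have l2 := pv_encC_lt n k.2 h.2
  have h4 : (n + 2) ^ 4 = (n + 2) ^ 2 * (n + 2) ^ 2 := by ring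
  obtain ⟨m, hm⟩ : ∃ m, (n + 2) ^ 2 = m + 1 :=
    ⟨(n + 2) ^ 2 - 1, by have := pow_pos (show 0 < n + 2 by omega) 2; omega⟩
  have hmin : pvEncC n k.1 ≤ m := by omega
  have hmul : pvEncC n k.1 * (m + 1) ≤ m * (m + 1) := Nat.mul_le_mul_right _ hmin
  have hsq : (m + 1) * (m + 1) = m * (m + 1) + m + 1 := by ring
  unfold pvEncP
  rw [h4, hm]
  omega

theorem pv_encP_inj (n : Nat) (k k' : pvSt) (h : pvInC n k.1 ∧ pvInC n k.2)
    (h' : pvInC n k'.1 ∧ pvInC n k'.2) (he : pvEncP n k = pvEncP n k') : k = k' := by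
  have l1 := pv_encC_lt n k.2 h.2
  have l2 := pv_encC_lt n k'.2 h'.2
  unfold pvEncP at he
  have e2 : pvEncC n k.2 = pvEncC n k'.2 := by
    have := congrArg (· % ((n + 2) ^ 2)) he
    simpa [Nat.mul_add_mod, Nat.mod_eq_of_lt l1, Nat.mod_eq_of_lt l2] using this
  have e1 : pvEncC n k.1 = pvEncC n k'.1 := by
    have hm : pvEncC n k.1 * (n + 2) ^ 2 = pvEncC n k'.1 * (n + 2) ^ 2 := by omega
    exact Nat.eq_of_mul_eq_mul_right (pow_pos (by omega) 2) hm
  exact Prod.ext (pv_encC_inj n _ _ h.1 h'.1 e1) (pv_encC_inj n _ _ h.2 h'.2 e2)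

theorem pv_size_bound (n : Nat) (l : List pvSt) (hnd : l.Nodup)
    (hin : ∀ k ∈ l, pvInC n k.1 ∧ pvInC n k.2) : l.length ≤ (n + 2) ^ 4 := by
  have hmapnd : (l.map (pvEncP n)).Nodup := by
    refine List.Nodup.map_on ?_ hnd
    intro x hx y hy hxy
    exact pv_encP_inj n x y (hin x hx) (hin y hy) hxy
  have hsub : (l.map (pvEncP n)).toFinset ⊆ Finset.range ((n + 2) ^ 4) := by
    intro x hx
    simp only [List.mem_toFinset, List.mem_map] at hx
    obtain ⟨k, hk, rfl⟩ := hx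
    exact Finset.mem_range.2 (pv_encP_lt n k (hin k hk))
  have := Finset.card_le_card hsub
  rw [List.toFinset_card_of_nodup hmapnd, Finset.card_range, List.length_map] at this
  exact this

-- canonical keys: equal exactly on set-equal states; components stay legal cells
theorem pvKey_eq_iff (a b c d : Int × Int) (hab : a ≠ b) (hcd : c ≠ d) :
    pvKey (a, b) = pvKey (c, d) ↔ PySem.Set.equal [a, b] [c, d] = true := by
  rw [pv_equal_iff a b c d hab hcd]
  obtain ⟨a1, a2⟩ := a; obtain ⟨b1, b2⟩ := b
  obtain ⟨c1, c2⟩ := c; obtain ⟨d1, d2⟩ := d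
  have hab' : ¬(a1 = b1 ∧ a2 = b2) := by simpa [Prod.ext_iff] using hab
  have hcd' : ¬(c1 = d1 ∧ c2 = d2) := by simpa [Prod.ext_iff] using hcd
  simp only [pvKey, pvLeLex, Bool.or_eq_true, Bool.and_eq_true, decide_eq_true_eq, beq_iff_eq]
  split_ifs with h1 h2 h2 <;>
    simp only [Bool.or_eq_true, Bool.and_eq_true, decide_eq_true_eq, beq_iff_eq,
      not_or, not_and, not_lt] at h1 h2 <;>
    simp only [Prod.mk.injEq] <;>
    constructor <;> intro h <;> omega

theorem pv_key_inrange (n : Nat) (s : List (Int × Int)) (hs : pvGood n s) :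
    pvInC n (pvKey (pvToPair s)).1 ∧ pvInC n (pvKey (pvToPair s)).2 := by
  obtain ⟨a, b, rfl, hab, ha, hb⟩ := hs
  simp only [pvToPair, pvKey]
  split_ifs <;> exact ⟨by assumption, by assumption⟩

-- pvToPair of a legal state is a legal pair, and preserves goal membership
theorem pv_toPair_good (n : Nat) (s : List (Int × Int)) (hs : pvGood n s) :
    pvGoodP n (pvToPair s) := by
  obtain ⟨a, b, rfl, hab, ha, hb⟩ := hs
  exact ⟨hab, ha, hb⟩

theorem pv_contains_iff (s : List (Int × Int)) (a b t : Int × Int) (hs : s = [a, b]) :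
    s.contains t = true ↔ (t = a ∨ t = b) := by
  subst hs
  simp [List.contains_eq_mem]

-- B's dict-membership test computes A's visited-list scan
theorem pv_mem_corr (n : Nat) (visited : List (List (Int × Int))) (np : List (Int × Int))
    (hv : ∀ s ∈ visited, pvGood n s) (hnp : pvGood n np)
    (dist : PySem.Dict pvSt Int)
    (hk : dist.keys = visited.map (fun s => pvKey (pvToPair s))) :
    dist.contains (pvKey (pvToPair np)) = pvMemState visited np := by
  obtain ⟨c, d, hnp', hcd, hc, hd⟩ := hnp
  have hiff : dist.contains (pvKey (pvToPair np)) = true ↔ pvMemState visited np = true := by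
    rw [PySem.Dict.contains_iff_mem_keys, hk, List.mem_map]
    unfold pvMemState
    rw [List.any_eq_true]
    constructor
    · rintro ⟨s, hsm, hkey⟩
      obtain ⟨a, b, hs', hab, _, _⟩ := hv s hsm
      refine ⟨s, hsm, ?_⟩
      rw [hs', hnp']
      rw [hs', hnp'] at hkey
      simp only [pvToPair] at hkey
      exact (pvKey_eq_iff a b c d hab hcd).1 hkey
    · rintro ⟨s, hsm, heq⟩
      obtain ⟨a, b, hs', hab, _, _⟩ := hv s hsm
      refine ⟨s, hsm, ?_⟩
      rw [hs', hnp']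
      simp only [pvToPair]
      rw [hs', hnp'] at heq
      exact (pvKey_eq_iff a b c d hab hcd).2 heq
  cases hA : dist.contains (pvKey (pvToPair np)) <;> cases hB : pvMemState visited np <;>
    simp_all

-- the linear extract-min scan returns the head of a distance-sorted queue
theorem pv_argmin_head (e : Int × pvSt) (rest : List (Int × pvSt))
    (hmono : (e :: rest).Pairwise (fun a b => a.1 ≤ b.1)) :
    pvArgmin (e :: rest) = 0 ∧
      PySem.List.pop? (e :: rest) (pvArgmin (e :: rest)) = some (e, rest) := by
  have hmin : ∀ i ∈ PySem.List.pyRange 1 (e :: rest).length 1,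
      ¬ (((PySem.List.pyGet? (e :: rest) i).map Prod.fst).getD 0
          < ((PySem.List.pyGet? (e :: rest) (0 : Int)).map Prod.fst).getD 0) := by
    intro i hi
    rw [PySem.List.mem_pyRange_one] at hi
    obtain ⟨k, rfl⟩ : ∃ k : Nat, i = (k : Int) := ⟨i.toNat, by omega⟩
    have hk1 : 1 ≤ k := by exact_mod_cast hi.1
    have hk2 : k < (e :: rest).length := by exact_mod_cast hi.2
    rw [show ((0 : Int)) = ((0 : Nat) : Int) from rfl]
    simp only [PySem.List.pyGet?_natCast]
    rw [List.getElem?_eq_getElem hk2]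
    simp only [List.getElem?_cons_zero, Option.map_some, Option.getD_some]
    have hmem : (e :: rest)[k] ∈ rest := by
      obtain ⟨m, rfl⟩ : ∃ m, k = m + 1 := ⟨k - 1, by omega⟩
      simpa using List.getElem_mem (l := rest) (by simpa using hk2)
    have := (List.rel_of_pairwise_cons hmono) hmem
    omega
  have hz : pvArgmin (e :: rest) = 0 := by
    unfold pvArgmin
    generalize hL : PySem.List.pyRange 1 ((e :: rest).length : Int) 1 = L at hmin
    clear hL
    induction L with
    | nil => rfl
    | cons i t ih =>
      simp only [List.foldl_cons]
      rw [if_neg (hmin i (by simp))]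
      exact ih (fun j hj => hmin j (by simp [hj]))
  refine ⟨hz, ?_⟩
  rw [hz]
  exact PySem.List.pop?_zero_cons e rest

-- relaxing a scan of legal neighbours only appends fresh states at distance d+1
theorem pv_relax_post (n : Nat) (d : Int) :
    ∀ (nps : List (List (Int × Int))) (dist : PySem.Dict pvSt Int) (pq : List (Int × pvSt)),
      (∀ np ∈ nps, pvGood n np) →
      dist.keys.Nodup →
      (∀ k ∈ dist.keys, pvInC n k.1 ∧ pvInC n k.2) →
      (∀ v ∈ dist.values, v ≤ d + 1) →
      pq.length ≤ dist.size →
      ∃ extra dist',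
        pvRelax d nps dist pq = (dist', pq ++ extra)
        ∧ (∀ e ∈ extra, e.1 = d + 1 ∧ pvGoodP n e.2)
        ∧ dist'.keys.Nodup
        ∧ (∀ k ∈ dist'.keys, pvInC n k.1 ∧ pvInC n k.2)
        ∧ (∀ v ∈ dist'.values, v ≤ d + 1)
        ∧ (pq ++ extra).length ≤ dist'.size := by
  intro nps
  induction nps with
  | nil =>
    intro dist pq _ hnd hin hvals hsz
    exact ⟨[], dist, by simp [pvRelax], by simp, hnd, hin, hvals, by simpa using hsz⟩
  | cons nb rest ih =>
    intro dist pq hgood hnd hin hvals hsz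
    have hnb : pvGood n nb := hgood nb (by simp)
    have hrest : ∀ np ∈ rest, pvGood n np := fun np h => hgood np (by simp [h])
    rw [pvRelax]
    by_cases hc : dist.contains (pvKey (pvToPair nb)) = true
    · -- already known: the stored distance is ≤ d + 1, so no relaxation happens
      obtain ⟨v, hv⟩ : ∃ v, dist.get? (pvKey (pvToPair nb)) = some v := by
        rw [PySem.Dict.contains_eq_isSome_get?] at hc
        exact Option.isSome_iff_exists.1 hc
      have hvv : v ∈ dist.values := by
        have := PySem.Dict.mem_items_of_get?_eq_some dist hv
        exact List.mem_map.2 ⟨_, this, rfl⟩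
      have hle : v ≤ d + 1 := hvals v hvv
      have hgd : dist.getD (pvKey (pvToPair nb)) 0 = v := PySem.Dict.getD_of_get?_eq_some dist 0 hv
      have hne : ¬ (d + 1 < dist.getD (pvKey (pvToPair nb)) 0) := by rw [hgd]; omega
      rw [hc]
      simp only [Bool.not_true, Bool.false_or, decide_eq_true_eq]
      rw [if_neg hne]
      exact ih dist pq hrest hnd hin hvals hsz
    · -- fresh state: insert and push
      rw [Bool.not_eq_true] at hc
      rw [hc]
      simp only [Bool.not_false, Bool.true_or, if_true]
      obtain ⟨extra', dist', heq, hex, hnd', hin', hvals', hsz'⟩ :=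
        ih (dist.insert (pvKey (pvToPair nb)) (d + 1)) (pq ++ [(d + 1, pvToPair nb)]) hrest
          (PySem.Dict.nodup_keys_insert _ _ _ hnd)
          (by
            intro k hk
            rcases (PySem.Dict.mem_keys_insert _ _ _ _).1 hk with rfl | hk'
            · exact pv_key_inrange n nb hnb
            · exact hin k hk')
          (by
            intro v hvm
            rcases PySem.Dict.mem_values_insert _ _ _ _ hvm with rfl | hv'
            · omega
            · exact hvals v hv')
          (by
            rw [PySem.Dict.size_insert]
            simp [hc]
            omega)
      refine ⟨(d + 1, pvToPair nb) :: extra', dist', ?_, ?_, hnd', hin', hvals', ?_⟩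
      · rw [heq]
        simp
      · intro e he
        rcases List.mem_cons.1 he with rfl | he'
        · exact ⟨rfl, pv_toPair_good n nb hnb⟩
        · exact hex e he'
      · simpa using hsz'

-- one neighbour scan, in lockstep: A's queue/visited loop against B's dict/queue relaxation
theorem pv_scan (n : Nat) (x : Int) :
    ∀ (nps : List (List (Int × Int))) (queue : List (List (Int × Int) × Int))
      (visited : List (List (Int × Int))) (dist : PySem.Dict pvSt Int),
      (∀ np ∈ nps, pvGood n np) →
      dist.keys = visited.map (fun s => pvKey (pvToPair s)) →
      dist.keys.Nodup →
      (∀ s ∈ visited, pvGood n s) →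
      (∀ s ∈ visited, s.contains ((n : Int), (n : Int)) = false) →
      (∀ v ∈ dist.values, v ≤ x + 1) →
      (queue.map (fun e => (e.2, pvToPair e.1))).length ≤ dist.size →
      (∃ news dist',
        pvScanA n (x + 1) nps queue visited
            = .ok (queue ++ news.map (fun s => (s, x + 1)), visited ++ news)
        ∧ pvRelax x nps dist (queue.map (fun e => (e.2, pvToPair e.1)))
            = (dist', queue.map (fun e => (e.2, pvToPair e.1)) ++ news.map (fun s => (x + 1, pvToPair s)))
        ∧ dist'.keys = (visited ++ news).map (fun s => pvKey (pvToPair s))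
        ∧ dist'.keys.Nodup
        ∧ (∀ s ∈ news, pvGood n s)
        ∧ (∀ s ∈ news, s.contains ((n : Int), (n : Int)) = false)
        ∧ (∀ v ∈ dist'.values, v ≤ x + 1)
        ∧ (queue.map (fun e => (e.2, pvToPair e.1)) ++ news.map (fun s => (x + 1, pvToPair s))).length ≤ dist'.size)
      ∨ (∃ front gp back dist',
        pvScanA n (x + 1) nps queue visited = .error (x + 1)
        ∧ pvRelax x nps dist (queue.map (fun e => (e.2, pvToPair e.1)))
            = (dist', queue.map (fun e => (e.2, pvToPair e.1)) ++ front ++ (x + 1, gp) :: back)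
        ∧ (∀ e ∈ front, e.1 = x + 1 ∧ (e.2.1 ≠ ((n : Int), (n : Int)) ∧ e.2.2 ≠ ((n : Int), (n : Int))) ∧ pvGoodP n e.2)
        ∧ (gp.1 = ((n : Int), (n : Int)) ∨ gp.2 = ((n : Int), (n : Int))) ∧ pvGoodP n gp
        ∧ (∀ e ∈ back, e.1 = x + 1 ∧ pvGoodP n e.2)
        ∧ dist'.keys.Nodup
        ∧ (∀ k ∈ dist'.keys, pvInC n k.1 ∧ pvInC n k.2)
        ∧ (∀ v ∈ dist'.values, v ≤ x + 1)
        ∧ (queue.map (fun e => (e.2, pvToPair e.1)) ++ front ++ (x + 1, gp) :: back).length ≤ dist'.size) := by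
  intro nps
  induction nps with
  | nil =>
    intro queue visited dist _ hk hnd hvg hnv hvals hsz
    exact Or.inl ⟨[], dist, by simp [pvScanA], by simp [pvRelax], by simpa using hk,
      hnd, by simp, by simp, hvals, by simpa using hsz⟩
  | cons np rest ih =>
    intro queue visited dist hgood hk hnd hvg hnv hvals hsz
    have hszq : queue.length ≤ dist.size := by simpa using hsz
    have hnp : pvGood n np := hgood np (by simp)
    obtain ⟨a, b, hab', hne, ha, hb⟩ := hnp
    have hnp : pvGood n np := hgood np (by simp)
    have hrest : ∀ q ∈ rest, pvGood n q := fun q h => hgood q (by simp [h])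
    have hmc := pv_mem_corr n visited np hvg hnp dist hk
    rw [pvScanA, pvRelax]
    by_cases hg : np.contains ((n : Int), (n : Int)) = true
    · -- goal generated: A returns, B pushes it and keeps relaxing
      have hmem : pvMemState visited np = false := by
        rcases hmf : pvMemState visited np with _ | _
        · rfl
        · exfalso
          obtain ⟨t, htm, hteq⟩ := List.any_eq_true.1 hmf
          have hmemt : ((n : Int), (n : Int)) ∈ t := by
            have hmm := (PySem.Set.equal_iff t np).1 hteq ((n : Int), (n : Int))
            refine hmm.2 ?_
            rw [hab']
            rcases (pv_contains_iff np a b _ hab').1 hg with h | h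
            · simp [h]
            · simp [h]
          have hct := hnv t htm
          rw [List.contains_eq_mem] at hct
          exact absurd hmemt (by simpa using hct)
      have hc : dist.contains (pvKey (pvToPair np)) = false := by rw [hmc, hmem]
      rw [if_pos hg,
        if_pos (show (!dist.contains (pvKey (pvToPair np))
            || decide (x + 1 < dist.getD (pvKey (pvToPair np)) 0)) = true from by simp [hc])]
      obtain ⟨extra, dist', heq, hex, hnd', hin', hvals', hsz'⟩ :=
        pv_relax_post n x rest (dist.insert (pvKey (pvToPair np)) (x + 1))
          (queue.map (fun e => (e.2, pvToPair e.1)) ++ [(x + 1, pvToPair np)]) hrest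
          (PySem.Dict.nodup_keys_insert _ _ _ hnd)
          (by
            intro k hkm
            rcases (PySem.Dict.mem_keys_insert _ _ _ _).1 hkm with rfl | hk'
            · exact pv_key_inrange n np ⟨a, b, hab', hne, ha, hb⟩
            · have hmk : k ∈ visited.map (fun s => pvKey (pvToPair s)) := by rw [← hk]; exact hk'
              obtain ⟨t, htm, rfl⟩ := List.mem_map.1 hmk
              exact pv_key_inrange n t (hvg t htm))
          (by
            intro v hvm
            rcases PySem.Dict.mem_values_insert _ _ _ _ hvm with rfl | hv'
            · omega
            · exact hvals v hv')
          (by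
            rw [PySem.Dict.size_insert]
            simp only [hc, Bool.false_eq_true, if_false, List.length_append,
              List.length_map, List.length_cons, List.length_nil]
            omega)
      refine Or.inr ⟨[], pvToPair np, extra, dist', rfl, ?_, by simp, ?_,
        (by rw [hab']; exact ⟨hne, ha, hb⟩), hex, hnd', hin', hvals', ?_⟩
      · rw [heq]; simp
      · rcases (pv_contains_iff np a b _ hab').1 hg with h | h
        · left; rw [hab']; simp [pvToPair, h]
        · right; rw [hab']; simp [pvToPair, h]
      · rw [show queue.map (fun e => (e.2, pvToPair e.1)) ++ [] ++ (x + 1, pvToPair np) :: extra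
            = (queue.map (fun e => (e.2, pvToPair e.1)) ++ [(x + 1, pvToPair np)]) ++ extra from by simp]
        exact hsz'
    · rw [Bool.not_eq_true] at hg
      have hg' : ((n : Int), (n : Int)) ∉ np := by
        rw [List.contains_eq_mem] at hg
        simpa using hg
      rw [if_neg (by simp [hg'])]
      by_cases hm : pvMemState visited np = true
      · -- state already seen: both sides skip
        have hc : dist.contains (pvKey (pvToPair np)) = true := by rw [hmc, hm]
        obtain ⟨v, hv⟩ : ∃ v, dist.get? (pvKey (pvToPair np)) = some v := by
          rw [PySem.Dict.contains_eq_isSome_get?] at hc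
          exact Option.isSome_iff_exists.1 hc
        have hvv : v ∈ dist.values := by
          have := PySem.Dict.mem_items_of_get?_eq_some dist hv
          exact List.mem_map.2 ⟨_, this, rfl⟩
        have hgd : dist.getD (pvKey (pvToPair np)) 0 = v := PySem.Dict.getD_of_get?_eq_some dist 0 hv
        have hnlt : ¬ (x + 1 < dist.getD (pvKey (pvToPair np)) 0) := by
          rw [hgd]; have := hvals v hvv; omega
        rw [if_pos hm,
          if_neg (show ¬ (!dist.contains (pvKey (pvToPair np))
              || decide (x + 1 < dist.getD (pvKey (pvToPair np)) 0)) = true from by simp [hc, hnlt])]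
        exact ih queue visited dist hrest hk hnd hvg hnv hvals hsz
      · -- fresh non-goal state: A pushes on the queue, B inserts and pushes
        rw [Bool.not_eq_true] at hm
        have hc : dist.contains (pvKey (pvToPair np)) = false := by rw [hmc, hm]
        rw [if_neg (by simp [hm]),
          if_pos (show (!dist.contains (pvKey (pvToPair np))
              || decide (x + 1 < dist.getD (pvKey (pvToPair np)) 0)) = true from by simp [hc])]
        have hmap : (queue ++ [(np, x + 1)]).map (fun e => (e.2, pvToPair e.1))
            = queue.map (fun e => (e.2, pvToPair e.1)) ++ [(x + 1, pvToPair np)] := by simp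
        have := ih (queue ++ [(np, x + 1)]) (visited ++ [np]) (dist.insert (pvKey (pvToPair np)) (x + 1))
          hrest
          (by
            rw [PySem.Dict.keys_insert_of_not_contains dist _ hc, hk]
            simp)
          (PySem.Dict.nodup_keys_insert _ _ _ hnd)
          (by
            intro t ht
            rcases List.mem_append.1 ht with h | h
            · exact hvg t h
            · rw [List.mem_singleton.mp h]; exact ⟨a, b, hab', hne, ha, hb⟩)
          (by
            intro t ht
            rcases List.mem_append.1 ht with h | h
            · exact hnv t h
            · rw [List.mem_singleton.mp h]; exact hg)
          (by
            intro v hvm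
            rcases PySem.Dict.mem_values_insert _ _ _ _ hvm with rfl | hv'
            · omega
            · exact hvals v hv')
          (by
            rw [hmap, PySem.Dict.size_insert]
            simp only [hc, Bool.false_eq_true, if_false, List.length_append,
              List.length_map, List.length_cons, List.length_nil]
            omega)
        rw [hmap] at this
        rcases this with ⟨news, dist', hA, hB, hk', hnd', hgood', hng', hvals', hsz'⟩
          | ⟨front, gp, back, dist', hA, hB, hfr, hgp, hgpg, hbk, hnd', hin', hvals', hsz'⟩
        · refine Or.inl ⟨np :: news, dist', ?_, ?_, by simpa using hk', hnd', ?_, ?_, hvals', ?_⟩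
          · rw [hA]; simp
          · rw [hB]; simp
          · intro t ht
            rcases List.mem_cons.1 ht with rfl | h
            · exact ⟨a, b, hab', hne, ha, hb⟩
            · exact hgood' t h
          · intro t ht
            rcases List.mem_cons.1 ht with rfl | h
            · exact hg
            · exact hng' t h
          · simpa using hsz'
        · refine Or.inr ⟨(x + 1, pvToPair np) :: front, gp, back, dist', hA, ?_, ?_, hgp, hgpg, hbk, hnd', hin', hvals', ?_⟩
          · rw [hB]; simp
          · intro e he
            rcases List.mem_cons.1 he with rfl | h
            · refine ⟨rfl, ?_, by rw [hab']; exact ⟨hne, ha, hb⟩⟩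
              have hnm : ((n : Int), (n : Int)) ∉ np := by
                rw [List.contains_eq_mem] at hg
                simpa using hg
              rw [hab'] at hnm
              simp only [pvToPair, hab']
              constructor <;> intro hcon <;> apply hnm <;> simp [hcon]
            · exact hfr e h
          · simpa using hsz'

-- constant-distance blocks are trivially sorted
theorem pv_pairwise_const (c : Int) : ∀ (l : List (Int × pvSt)), (∀ e ∈ l, e.1 = c) →
    l.Pairwise (fun a b => a.1 ≤ b.1) := by
  intro l
  induction l with
  | nil => intro _; exact List.Pairwise.nil
  | cons e t ih =>
    intro h
    refine List.Pairwise.cons ?_ (ih (fun e' he' => h e' (by simp [he'])))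
    intro e' he'
    rw [h e (by simp), h e' (by simp [he'])]

-- one step of B's loop on a distance-sorted queue: pop the head
theorem pvLoopB_step (board : List (List Int)) (n : Int) (fuel : Nat)
    (dist : PySem.Dict pvSt Int) (d0 : Int) (s0 : pvSt) (rest : List (Int × pvSt))
    (hmono : ((d0, s0) :: rest).Pairwise (fun a b => a.1 ≤ b.1)) :
    pvLoopB board n (fuel + 1) dist ((d0, s0) :: rest)
      = if (s0.1 == (n, n) || s0.2 == (n, n)) = true then d0
        else pvLoopB board n fuel (pvRelax d0 (getNewPos [s0.1, s0.2] board) dist rest).1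
               (pvRelax d0 (getNewPos [s0.1, s0.2] board) dist rest).2 := by
  rw [pvLoopB]
  rw [(pv_argmin_head (d0, s0) rest hmono).2]

-- once a goal state sits in the priority queue behind non-goal entries only, B returns its distance
theorem pv_drain (board : List (List Int)) (hsq : pvSquare board) :
    ∀ (fuel : Nat) (pre : List (Int × pvSt)) (D : Int) (gp : pvSt) (suf : List (Int × pvSt))
      (dist : PySem.Dict pvSt Int),
      (∀ e ∈ pre, (e.2.1 ≠ ((board.length : Int), (board.length : Int)) ∧ e.2.2 ≠ ((board.length : Int), (board.length : Int))) ∧ pvGoodP board.length e.2) →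
      (gp.1 = ((board.length : Int), (board.length : Int)) ∨ gp.2 = ((board.length : Int), (board.length : Int))) →
      (∀ e ∈ suf, pvGoodP board.length e.2) →
      (pre ++ (D, gp) :: suf).Pairwise (fun a b => a.1 ≤ b.1) →
      (∀ a ∈ pre ++ (D, gp) :: suf, ∀ b ∈ pre ++ (D, gp) :: suf, a.1 ≤ b.1 + 1) →
      dist.keys.Nodup →
      (∀ k ∈ dist.keys, pvInC board.length k.1 ∧ pvInC board.length k.2) →
      (∀ v ∈ dist.values, ∀ e ∈ pre ++ (D, gp) :: suf, v ≤ e.1 + 1) →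
      (pre ++ (D, gp) :: suf).length ≤ dist.size →
      pre.length < fuel →
      pvLoopB (pvPad board) board.length fuel dist (pre ++ (D, gp) :: suf) = D := by
  intro fuel pre
  induction pre generalizing fuel with
  | nil =>
    intro D gp suf dist _ hgp _ hmono _ _ _ _ _ hfuel
    obtain ⟨f, rfl⟩ : ∃ f, fuel = f + 1 := ⟨fuel - 1, by omega⟩
    simp only [List.nil_append]
    rw [pvLoopB_step (pvPad board) (board.length : Int) f dist D gp suf (by simpa using hmono)]
    rw [if_pos (by rcases hgp with h | h <;> simp [h])]
  | cons h pre' ih =>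
    intro D gp suf dist hpre hgp hsuf hmono hspread hnd hin hvals2 hsz hfuel
    obtain ⟨f, rfl⟩ : ∃ f, fuel = f + 1 := ⟨fuel - 1, by omega⟩
    obtain ⟨d0, s0⟩ := h
    obtain ⟨⟨hs1, hs2⟩, hsP⟩ := hpre (d0, s0) (by simp)
    have hmono' : ((d0, s0) :: (pre' ++ (D, gp) :: suf)).Pairwise (fun a b => a.1 ≤ b.1) := by
      simpa using hmono
    simp only [List.cons_append]
    rw [pvLoopB_step (pvPad board) (board.length : Int) f dist d0 s0 (pre' ++ (D, gp) :: suf)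
      (by simpa using hmono)]
    rw [if_neg (by simp [hs1, hs2])]
    have hsgood : pvGood board.length [s0.1, s0.2] := ⟨s0.1, s0.2, rfl, hsP.1, hsP.2.1, hsP.2.2⟩
    obtain ⟨extra, dist', heq, hex, hnd', hin', hvals', hsz'⟩ :=
      pv_relax_post board.length d0 (getNewPos [s0.1, s0.2] (pvPad board)) dist
        (pre' ++ (D, gp) :: suf)
        (pv_getNewPos_good board hsq _ hsgood)
        hnd hin
        (fun v hv => hvals2 v hv (d0, s0) (by simp))
        (by simp at hsz ⊢; omega)
    rw [heq]
    have hshape : (pre' ++ (D, gp) :: suf) ++ extra = pre' ++ (D, gp) :: (suf ++ extra) := by simp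
    rw [hshape]
    have hheadle : ∀ e ∈ pre' ++ (D, gp) :: suf, d0 ≤ e.1 :=
      fun e he => List.rel_of_pairwise_cons hmono' he
    have hsub : ∀ e : Int × pvSt, e ∈ pre' ++ (D, gp) :: suf →
        e ∈ ((d0, s0) :: pre') ++ (D, gp) :: suf := by
      intro e he
      simp only [List.cons_append, List.mem_cons]
      exact Or.inr he
    have hlespread : ∀ e ∈ pre' ++ (D, gp) :: suf, e.1 ≤ d0 + 1 :=
      fun e he => hspread e (hsub e he) (d0, s0) (by simp)
    refine ih f D gp (suf ++ extra) dist'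
      (fun e he => hpre e (by simp [he])) hgp
      ?_ ?_ ?_ hnd' hin' ?_ ?_ (by simp at hfuel ⊢; omega)
    · intro e he
      rcases List.mem_append.1 he with h | h
      · exact hsuf e h
      · exact (hex e h).2
    · rw [← hshape]
      rw [List.pairwise_append]
      refine ⟨hmono'.of_cons, ?_, ?_⟩
      · exact pv_pairwise_const (d0 + 1) extra (fun e he => (hex e he).1)
      · intro e he e' he'
        rw [(hex e' he').1]
        exact hlespread e he
    · rw [← hshape]
      intro e he e' he'
      rcases List.mem_append.1 he with h1 | h1 <;> rcases List.mem_append.1 he' with h2 | h2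
      · exact hspread e (hsub e h1) e' (hsub e' h2)
      · rw [(hex e' h2).1]
        have := hlespread e h1
        omega
      · rw [(hex e h1).1]
        have := hheadle e' h2
        omega
      · rw [(hex e h1).1, (hex e' h2).1]
        omega
    · rw [← hshape]
      intro v hv e he
      have hvle : v ≤ d0 + 1 := hvals' v hv
      rcases List.mem_append.1 he with h1 | h1
      · have := hheadle e h1
        omega
      · rw [(hex e h1).1]
        omega
    · rw [← hshape]
      exact hsz' 

-- a dict's size is the number of its keys
theorem pv_size_eq_keys (dist : PySem.Dict pvSt Int) : dist.size = dist.keys.length := by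
  simp [PySem.Dict.size, PySem.Dict.keys]

-- constant-distance blocks on the A side are trivially sorted
theorem pv_pairwise_const2 (c : Int) : ∀ (l : List (List (Int × Int) × Int)),
    (∀ e ∈ l, e.2 = c) → l.Pairwise (fun a b => a.2 ≤ b.2) := by
  intro l
  induction l with
  | nil => intro _; exact List.Pairwise.nil
  | cons e t ih =>
    intro h
    refine List.Pairwise.cons ?_ (ih (fun e' he' => h e' (by simp [he'])))
    intro e' he'
    rw [h e (by simp), h e' (by simp [he'])]

-- a non-goal state stays non-goal as a pair
theorem pv_toPair_ne (n : Nat) (s : List (Int × Int)) (hs : pvGood n s)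
    (hng : s.contains ((n : Int), (n : Int)) = false) :
    (pvToPair s).1 ≠ ((n : Int), (n : Int)) ∧ (pvToPair s).2 ≠ ((n : Int), (n : Int)) := by
  obtain ⟨a, b, rfl, _, _, _⟩ := hs
  rw [List.contains_eq_mem] at hng
  have hnm : ((n : Int), (n : Int)) ∉ [a, b] := by simpa using hng
  simp only [pvToPair]
  constructor <;> intro h <;> apply hnm <;> simp [h]

-- the main simulation: A's FIFO loop against B's Dijkstra loop
theorem pv_lock (board : List (List Int)) (hsq : pvSquare board) :
    ∀ (fA : Nat) (dlow : Int) (queue : List (List (Int × Int) × Int))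
      (visited : List (List (Int × Int))) (dist : PySem.Dict pvSt Int),
      dist.keys = visited.map (fun s => pvKey (pvToPair s)) →
      dist.keys.Nodup →
      (∀ s ∈ visited, pvGood board.length s) →
      (∀ s ∈ visited, s.contains ((board.length : Int), (board.length : Int)) = false) →
      (∀ e ∈ queue, e.1 ∈ visited) →
      queue.Pairwise (fun a b => a.2 ≤ b.2) →
      (∀ a ∈ queue, ∀ b ∈ queue, a.2 ≤ b.2 + 1) →
      (∀ e ∈ queue, dlow ≤ e.2) →
      (∀ v ∈ dist.values, v ≤ dlow + 1) →
      queue.length ≤ dist.size →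
      queue.length + ((board.length + 2) ^ 4 - visited.length) < fA →
      pvLoopA (pvPad board) board.length fA queue visited
        = pvLoopB (pvPad board) board.length (fA + (board.length + 2) ^ 4 + 1) dist
            (queue.map (fun e => (e.2, pvToPair e.1))) := by
  intro fA
  induction fA with
  | zero =>
    intro dlow queue visited dist _ _ _ _ _ _ _ _ _ _ hfuel
    omega
  | succ f ih =>
    intro dlow queue visited dist hk hnd hvg hnv hqv hq hspread hdl hvals hsz hfuel
    match hqe : queue with
    | [] => rfl
    | (s, x) :: rest =>
      have hx : dlow ≤ x := hdl (s, x) (by simp)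
      have hsvis : s ∈ visited := hqv (s, x) (by simp)
      have hsgood : pvGood board.length s := hvg s hsvis
      obtain ⟨a, b, hs', hne, ha, hb⟩ := hsgood
      have hsgood : pvGood board.length s := hvg s hsvis
      have hsng := hnv s hsvis
      have hkeysin : ∀ k ∈ dist.keys, pvInC board.length k.1 ∧ pvInC board.length k.2 := by
        intro k hkm
        rw [hk] at hkm
        obtain ⟨t, htm, rfl⟩ := List.mem_map.1 hkm
        exact pv_key_inrange board.length t (hvg t htm)
      have hsizevis : dist.size = visited.length := by
        have := congrArg List.length hk
        rw [pv_size_eq_keys]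
        simpa using this
      have hvisBnd : visited.length ≤ (board.length + 2) ^ 4 := by
        rw [← hsizevis, pv_size_eq_keys]
        exact pv_size_bound board.length dist.keys hnd hkeysin
      have hmonoB : ((x, pvToPair s) :: rest.map (fun e => (e.2, pvToPair e.1))).Pairwise
          (fun a b => a.1 ≤ b.1) := by
        have : ((x, pvToPair s) :: rest.map (fun e => (e.2, pvToPair e.1)))
            = ((s, x) :: rest).map (fun e => (e.2, pvToPair e.1)) := rfl
        rw [this]
        exact List.pairwise_map.mpr hq
      have hnotg := pv_toPair_ne board.length s ⟨a, b, hs', hne, ha, hb⟩ hsng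
      rw [pvLoopA]
      rw [show f + 1 + (board.length + 2) ^ 4 + 1 = (f + (board.length + 2) ^ 4 + 1) + 1 from by omega]
      rw [show ((s, x) :: rest).map (fun e => (e.2, pvToPair e.1))
          = (x, pvToPair s) :: rest.map (fun e => (e.2, pvToPair e.1)) from rfl]
      rw [pvLoopB_step (pvPad board) (board.length : Int) (f + (board.length + 2) ^ 4 + 1)
        dist x (pvToPair s) (rest.map (fun e => (e.2, pvToPair e.1))) hmonoB]
      rw [if_neg (by simp [hnotg.1, hnotg.2])]
      have hpairB : [(pvToPair s).1, (pvToPair s).2] = s := by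
        rw [hs']; rfl
      rw [hpairB]
      have hscan := pv_scan board.length x (getNewPos s (pvPad board)) rest visited dist
        (pv_getNewPos_good board hsq s ⟨a, b, hs', hne, ha, hb⟩)
        hk hnd hvg hnv
        (fun v hv => le_trans (hvals v hv) (by omega))
        (by simp; simp at hsz; omega)
      have hrestle : ∀ e ∈ rest, e.2 ≤ x + 1 :=
        fun e he => hspread e (by simp [he]) (s, x) (by simp)
      have hrestge : ∀ e ∈ rest, x ≤ e.2 :=
        fun e he => List.rel_of_pairwise_cons hq he
      rcases hscan with ⟨news, dist', hA, hB, hk', hnd', hgood', hng', hvals', hsz'⟩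
        | ⟨front, gp, back, dist', hA, hB, hfr, hgp, hgpg, hbk, hnd', hin', hvals', hsz'⟩
      · -- no goal in this scan: one more lockstep round
        rw [hA, hB]
        have hmapq : (rest ++ news.map (fun t => (t, x + 1))).map (fun e => (e.2, pvToPair e.1))
            = rest.map (fun e => (e.2, pvToPair e.1)) ++ news.map (fun t => (x + 1, pvToPair t)) := by
          simp
        have hvg' : ∀ t ∈ visited ++ news, pvGood board.length t := by
          intro t ht
          rcases List.mem_append.1 ht with h | h
          · exact hvg t h
          · exact hgood' t h
        have hsize' : dist'.size = (visited ++ news).length := by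
          have := congrArg List.length hk'
          rw [pv_size_eq_keys]
          simpa using this
        have hvisBnd' : (visited ++ news).length ≤ (board.length + 2) ^ 4 := by
          rw [← hsize', pv_size_eq_keys]
          refine pv_size_bound board.length dist'.keys hnd' ?_
          intro k hkm
          rw [hk'] at hkm
          obtain ⟨t, htm, rfl⟩ := List.mem_map.1 hkm
          exact pv_key_inrange board.length t (hvg' t htm)
        have hrec := ih x (rest ++ news.map (fun t => (t, x + 1))) (visited ++ news) dist'
          hk' hnd' hvg'
          (by
            intro t ht
            rcases List.mem_append.1 ht with h | h
            · exact hnv t h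
            · exact hng' t h)
          (by
            intro e he
            rcases List.mem_append.1 he with h | h
            · exact List.mem_append_left _ (hqv e (by simp [h]))
            · obtain ⟨t, htm, rfl⟩ := List.mem_map.1 h
              exact List.mem_append_right _ htm)
          (by
            rw [List.pairwise_append]
            refine ⟨hq.of_cons, ?_, ?_⟩
            · exact pv_pairwise_const2 (x + 1) _ (by
                intro e he
                obtain ⟨t, htm, rfl⟩ := List.mem_map.1 he
                rfl)
            · intro e he e' he'
              obtain ⟨t, htm, rfl⟩ := List.mem_map.1 he'
              exact hrestle e he
          )
          (by
            intro e he e' he'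
            have h1 : x ≤ e.2 ∧ e.2 ≤ x + 1 := by
              rcases List.mem_append.1 he with h | h
              · exact ⟨hrestge e h, hrestle e h⟩
              · obtain ⟨t, htm, rfl⟩ := List.mem_map.1 h
                exact ⟨by omega, by omega⟩
            have h2 : x ≤ e'.2 ∧ e'.2 ≤ x + 1 := by
              rcases List.mem_append.1 he' with h | h
              · exact ⟨hrestge e' h, hrestle e' h⟩
              · obtain ⟨t, htm, rfl⟩ := List.mem_map.1 h
                exact ⟨by omega, by omega⟩
            omega)
          (by
            intro e he
            rcases List.mem_append.1 he with h | h
            · exact hrestge e h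
            · obtain ⟨t, htm, rfl⟩ := List.mem_map.1 h
              omega)
          hvals'
          (by
            have := hsz'
            rw [← hmapq] at this
            simpa using this)
          (by
            have hlq : (rest ++ news.map (fun t => (t, x + 1))).length
                = rest.length + news.length := by simp
            have hlv : (visited ++ news).length = visited.length + news.length := by simp
            simp at hfuel
            omega)
        rw [hmapq] at hrec
        exact hrec
      · -- the goal was generated: A returns x+1, B drains the queue down to the goal state
        rw [hA, hB]
        have hsize' : (rest.map (fun e => (e.2, pvToPair e.1)) ++ front ++ (x + 1, gp) :: back).length
            ≤ (board.length + 2) ^ 4 :=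
          le_trans hsz' (by
            rw [pv_size_eq_keys]
            exact pv_size_bound board.length dist'.keys hnd' hin')
        have hMconst : ∀ e ∈ front ++ (x + 1, gp) :: back, e.1 = x + 1 := by
          intro e he
          rcases List.mem_append.1 he with h | h
          · exact (hfr e h).1
          · rcases List.mem_cons.1 h with rfl | h'
            · rfl
            · exact (hbk e h').1
        have hrestm : ∀ e ∈ rest.map (fun e => (e.2, pvToPair e.1)), x ≤ e.1 ∧ e.1 ≤ x + 1 := by
          intro e he
          obtain ⟨t, htm, rfl⟩ := List.mem_map.1 he
          exact ⟨hrestge t htm, hrestle t htm⟩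
        exact (pv_drain board hsq (f + (board.length + 2) ^ 4 + 1)
          (rest.map (fun e => (e.2, pvToPair e.1)) ++ front) (x + 1) gp back dist'
          (by
            intro e he
            rcases List.mem_append.1 he with h | h
            · obtain ⟨t, htm, rfl⟩ := List.mem_map.1 h
              have htv := hqv t (by simp [htm])
              exact ⟨pv_toPair_ne board.length t.1 (hvg t.1 htv) (hnv t.1 htv),
                pv_toPair_good board.length t.1 (hvg t.1 htv)⟩
            · exact ⟨(hfr e h).2.1, (hfr e h).2.2⟩)
          hgp
          (fun e he => (hbk e he).2)
          (by
            rw [show rest.map (fun e => (e.2, pvToPair e.1)) ++ front ++ (x + 1, gp) :: back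
                = rest.map (fun e => (e.2, pvToPair e.1)) ++ (front ++ (x + 1, gp) :: back) from by simp,
              List.pairwise_append]
            refine ⟨List.pairwise_map.mpr hq.of_cons, pv_pairwise_const (x + 1) _ hMconst, ?_⟩
            intro e he e' he'
            rw [hMconst e' he']
            exact (hrestm e he).2)
          (by
            intro e he e' he'
            have h1 : x ≤ e.1 ∧ e.1 ≤ x + 1 := by
              rcases List.mem_append.1 (by simpa using he : e ∈ rest.map (fun e => (e.2, pvToPair e.1)) ++ (front ++ (x + 1, gp) :: back)) with h | h
              · exact hrestm e h
              · rw [hMconst e h]; omega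
            have h2 : x ≤ e'.1 ∧ e'.1 ≤ x + 1 := by
              rcases List.mem_append.1 (by simpa using he' : e' ∈ rest.map (fun e => (e.2, pvToPair e.1)) ++ (front ++ (x + 1, gp) :: back)) with h | h
              · exact hrestm e' h
              · rw [hMconst e' h]; omega
            omega)
          hnd' hin'
          (by
            intro v hv e he
            have hvle := hvals' v hv
            have h1 : x ≤ e.1 := by
              rcases List.mem_append.1 (by simpa using he : e ∈ rest.map (fun e => (e.2, pvToPair e.1)) ++ (front ++ (x + 1, gp) :: back)) with h | h
              · exact (hrestm e h).1
              · rw [hMconst e h]; omega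
            omega)
          hsz'
          (by
            have : (rest.map (fun e => (e.2, pvToPair e.1)) ++ front).length + 1
                ≤ (rest.map (fun e => (e.2, pvToPair e.1)) ++ front ++ (x + 1, gp) :: back).length := by
              simp
            omega)).symm

-- MORE2


-- ===== VERDICT (by name: the statement is the Claim_ definition above) =====
theorem solution_spec : Claim_equal_solution := by
  intro board hdom hpre
  unfold Spec_solution solution solution_alt
  have hstart : pvStart = [((1 : Int), (1 : Int)), (1, 2)] := by decide
  rcases hpre with hsq | hbl
  · -- square board: full lockstep simulation
    have hL2 : 2 ≤ board.length := hsq.1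
    have hB1 : 1 ≤ (board.length + 2) ^ 4 := Nat.one_le_pow _ _ (by omega)
    have hlock := pv_lock board hsq ((board.length + 2) ^ 4 + 1) 0
      [(pvStart, 0)] [pvStart]
      (PySem.Dict.ofList [((((1 : Int), (1 : Int)), ((1 : Int), (2 : Int))), (0 : Int))])
      (by decide)
      (by decide)
      (by
        intro t ht
        rw [List.mem_singleton.mp ht, hstart]
        exact ⟨(1, 1), (1, 2), rfl, by decide,
          ⟨by omega, by omega, by omega, by omega⟩, ⟨by omega, by omega, by omega, by omega⟩⟩)
      (by
        intro t ht
        rw [List.mem_singleton.mp ht, hstart, List.contains_eq_mem]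
        simp only [List.mem_cons, List.not_mem_nil, or_false, decide_eq_false_iff_not, not_or]
        constructor <;> intro h <;> rw [Prod.ext_iff] at h <;>
          simp only at h <;> omega)
      (by intro e he; rw [List.mem_singleton.mp he]; simp)
      (by simp)
      (by
        intro e he e' he'
        rw [List.mem_singleton.mp he, List.mem_singleton.mp he']
        omega)
      (by intro e he; rw [List.mem_singleton.mp he])
      (by
        intro v hv
        have : v = 0 := by
          have hvals0 : (PySem.Dict.ofList
              [((((1 : Int), (1 : Int)), ((1 : Int), (2 : Int))), (0 : Int))]).values = [0] := by decide
          rw [hvals0] at hv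
          simpa using hv
        omega)
      (by decide)
      (by simp; omega)
    rw [show 2 * (board.length + 2) ^ 4 + 2
        = (board.length + 2) ^ 4 + 1 + (board.length + 2) ^ 4 + 1 from by omega]
    rw [show ([((0 : Int), (((1 : Int), (1 : Int)), ((1 : Int), (2 : Int))))] : List (Int × pvSt))
        = [(pvStart, (0 : Int))].map (fun e => (e.2, pvToPair e.1)) from by decide]
    exact hlock
  · -- blocked board: both searches stop after the very first (empty) neighbour scan
    have hL2 : 2 ≤ board.length := hbl.1
    have hemp := pv_blocked_empty board hbl
    rw [pvLoopA, hemp]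
    rw [show (2 * (board.length + 2) ^ 4 + 2) = (2 * (board.length + 2) ^ 4 + 1) + 1 from by omega]
    rw [pvLoopB_step (pvPad board) (board.length : Int) (2 * (board.length + 2) ^ 4 + 1)
      (PySem.Dict.ofList [((((1 : Int), (1 : Int)), ((1 : Int), (2 : Int))), (0 : Int))])
      0 (((1 : Int), (1 : Int)), ((1 : Int), (2 : Int))) [] (by simp)]
    rw [if_neg (by
      simp only [Bool.or_eq_true, beq_iff_eq, Prod.mk.injEq, not_or, not_and]
      constructor <;> intro h <;> omega)]
    rw [show ([((1 : Int), (1 : Int)), ((1 : Int), (2 : Int))] : List (Int × Int))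
        = pvStart from by decide] at *
    rw [hemp]
    simp [pvScanA, pvRelax, pvLoopA, pvLoopB]
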